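-- pv_equiv track=rewrite | github.com/ck2739046/maidata-diff | main.py | get_segment_position
-- ===== SOURCE A (Python) =====
-- def get_segment_position(inote_raw, segment_index):
--
--     if segment_index < 0:
--         return 0
--
--     segments = inote_raw.split(',')
--     if segment_index >= len(segments):
--         return len(inote_raw)
--
--     current_pos = 0
--     for i in range(segment_index):
--         current_pos += len(segments[i]) + 1  # +1 for comma
--
--     return current_pos
-- ===== SOURCE B (Python) =====
-- def get_segment_position(inote_raw, segment_index):
--     if segment_index <= 0:
--         return 0
--     k = segment_index
--     for i, ch in enumerate(inote_raw):
--         if ch == ',':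
--             k -= 1
--             if k == 0:
--                 return i + 1
--     return len(inote_raw)
-- ===== Notes on version B (the rewrite author's own statement) =====
-- stated objective: alternative
-- what changed: Instead of splitting the whole string into a segment list and summing the lengths of the first segment_index segments, B scans the string once left to right, counting commas, and returns the index right after the segment_index-th comma (or len(inote_raw) if there are fewer commas).
import Mathlib
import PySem

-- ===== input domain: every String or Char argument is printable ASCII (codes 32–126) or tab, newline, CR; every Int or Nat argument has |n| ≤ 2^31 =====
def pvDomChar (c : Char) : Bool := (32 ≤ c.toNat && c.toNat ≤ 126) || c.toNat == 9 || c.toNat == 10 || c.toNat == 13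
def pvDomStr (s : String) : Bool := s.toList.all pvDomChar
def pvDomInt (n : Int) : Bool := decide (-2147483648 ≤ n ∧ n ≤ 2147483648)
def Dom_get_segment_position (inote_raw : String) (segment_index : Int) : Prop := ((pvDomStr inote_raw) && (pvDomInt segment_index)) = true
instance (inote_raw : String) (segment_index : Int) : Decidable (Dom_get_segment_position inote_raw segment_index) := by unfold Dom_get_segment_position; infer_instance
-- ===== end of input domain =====

-- B replaces split-and-sum by a single left-to-right comma scan returning the index
-- right after the segment_index-th comma; same value everywhere (alternative decomposition).

-- ===== PORT A =====
def get_segment_position (inote_raw : String) (segment_index : Int) : Int :=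
  if segment_index < 0 then 0
  else
    let segments := PySem.Chars.splitOn inote_raw.toList [',']
    if segment_index ≥ (segments.length : Int) then PySem.Str.len inote_raw
    else
      (PySem.List.pyRange 0 segment_index 1).foldl
        (fun current_pos i => current_pos + (PySem.List.len (PySem.List.pyGetD segments i []) + 1)) 0

-- ===== PORT B =====
-- the for-loop over enumerate(inote_raw): early return = some, fall-through = none
def gspScan (cs : List Char) (k : Int) (i : Int) : Option Int :=
  match cs with
  | [] => none
  | c :: rest =>
      if c = ',' then
        if k - 1 = 0 then some (i + 1) else gspScan rest (k - 1) (i + 1)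
      else gspScan rest k (i + 1)

def get_segment_position_alt (inote_raw : String) (segment_index : Int) : Int :=
  if segment_index ≤ 0 then 0
  else (gspScan inote_raw.toList segment_index 0).getD (PySem.Str.len inote_raw)

-- ===== PRECONDITION & SPEC =====
def Spec_get_segment_position (inote_raw : String) (segment_index : Int) (out : Int) : Prop := out = get_segment_position_alt inote_raw segment_index
instance (inote_raw : String) (segment_index : Int) (out : Int) : Decidable (Spec_get_segment_position inote_raw segment_index out) := by unfold Spec_get_segment_position; infer_instance

-- ===== CLAIM (what is proved, stated in full; the proofs are below) =====
def Claim_equal_get_segment_position : Prop := ∀ (inote_raw : String) (segment_index : Int), Dom_get_segment_position inote_raw segment_index → Spec_get_segment_position inote_raw segment_index (get_segment_position inote_raw segment_index)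

-- ===== LEMMAS AND PROOFS =====

-- reference split: Python's s.split(',') on the character list
def pySplit : List Char → List (List Char)
  | [] => [[]]
  | c :: rest => if c = ',' then [] :: pySplit rest else (pySplit rest).modifyHead (c :: ·)

theorem pySplit_ne_nil (cs : List Char) : pySplit cs ≠ [] := by
  cases cs with
  | nil => simp [pySplit]
  | cons c rest =>
      simp only [pySplit]
      split
      · simp
      · cases h : pySplit rest with
        | nil => exact absurd h (pySplit_ne_nil rest)
        | cons a t => simp

theorem splitOn_go_eq (fuel : Nat) : ∀ (l cur : List Char) (acc : List (List Char)), l.length ≤ fuel →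
    PySem.Chars.splitOn.go [','] fuel l cur acc
      = acc.reverse ++ (pySplit l).modifyHead (fun x => cur.reverse ++ x) := by
  induction fuel with
  | zero =>
      intro l cur acc h
      have hl : l = [] := by cases l <;> simp_all
      subst hl
      rw [PySem.Chars.splitOn.go.eq_def]
      simp [pySplit]
  | succ fuel ih =>
      intro l cur acc h
      cases l with
      | nil => rw [PySem.Chars.splitOn.go.eq_def]; simp [pySplit]
      | cons c rest =>
          rw [PySem.Chars.splitOn.go.eq_def]
          by_cases hc : c = ','
          · subst hc
            simp only [List.isPrefixOf, BEq.rfl, Bool.true_and, if_true,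
              List.length_cons, List.drop_succ_cons, List.length_nil, List.drop_zero]
            rw [ih rest [] (cur.reverse :: acc) (by simpa using Nat.le_of_succ_le_succ h)]
            cases hr : pySplit rest with
            | nil => exact absurd hr (pySplit_ne_nil rest)
            | cons a t => simp [pySplit, hr]
          · have hpre : [','].isPrefixOf (c :: rest) = false := by
              simp [List.isPrefixOf]; exact fun h => absurd h.symm hc
            simp only [hpre, Bool.false_eq_true, if_false]
            rw [ih rest (c :: cur) acc (by simpa using Nat.le_of_succ_le_succ h)]
            cases hr : pySplit rest with
            | nil => exact absurd hr (pySplit_ne_nil rest)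
            | cons a t => simp [pySplit, hc, hr]

theorem splitOn_eq_pySplit (cs : List Char) :
    PySem.Chars.splitOn cs [','] = pySplit cs := by
  have h := splitOn_go_eq (cs.length + 1) cs [] [] (by omega)
  rw [PySem.Chars.splitOn, h]
  cases hr : pySplit cs with
  | nil => exact absurd hr (pySplit_ne_nil cs)
  | cons a t => simp

-- the scan, characterised through pySplit
theorem gspScan_spec : ∀ (cs : List Char) (k : Int), 1 ≤ k → ∀ i : Int,
    gspScan cs k i
      = if ((pySplit cs).length : Int) ≤ k then none
        else some (i + (((pySplit cs).take k.toNat).map (fun seg => (seg.length : Int))).sum + k) := by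
  intro cs
  induction cs with
  | nil =>
      intro k hk i
      rw [gspScan]
      rw [if_pos (by simp [pySplit]; omega)]
  | cons c rest ih =>
      intro k hk i
      by_cases hc : c = ','
      · subst hc
        have hsplit : pySplit (',' :: rest) = [] :: pySplit rest := by simp [pySplit]
        have hclen : ((pySplit (',' :: rest)).length : Int) = ((pySplit rest).length : Int) + 1 := by
          rw [hsplit]; push_cast [List.length_cons]; ring
        have hlen : 1 ≤ (pySplit rest).length := by
          cases hr : pySplit rest with
          | nil => exact absurd hr (pySplit_ne_nil rest)
          | cons a t => simp
        by_cases hk1 : k - 1 = 0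
        · have hk1' : k = 1 := by omega
          subst hk1'
          rw [gspScan, if_pos rfl, if_pos hk1, if_neg (by omega)]
          rw [hsplit]
          norm_num
        · have h2 : 1 ≤ k - 1 := by omega
          rw [gspScan, if_pos rfl, if_neg hk1, ih (k - 1) h2 (i + 1)]
          have hkt : k.toNat = (k - 1).toNat + 1 := by omega
          by_cases hle : ((pySplit rest).length : Int) ≤ k - 1
          · rw [if_pos hle, if_pos (by omega)]
          · rw [if_neg hle, if_neg (by omega)]
            rw [hsplit, hkt, List.take_succ_cons]
            simp only [List.map_cons, List.sum_cons, List.length_nil]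
            push_cast
            ring_nf
      · rw [gspScan, if_neg hc, ih k hk (i + 1)]
        have hlen : (pySplit (c :: rest)).length = (pySplit rest).length := by
          simp [pySplit, hc]
        by_cases hle : ((pySplit rest).length : Int) ≤ k
        · rw [if_pos hle, if_pos (by rw [hlen]; exact hle)]
        · rw [if_neg hle, if_neg (by rw [hlen]; exact hle)]
          have hkn : 1 ≤ k.toNat := by omega
          cases hr : pySplit rest with
          | nil => exact absurd hr (pySplit_ne_nil rest)
          | cons a t =>
              obtain ⟨m, hm⟩ : ∃ m, k.toNat = m + 1 := ⟨k.toNat - 1, by omega⟩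
              simp [pySplit, hc, hr, hm]
              ring

-- A's accumulation loop, characterised through the segment list
theorem foldA_spec (segs : List (List Char)) (n : Nat) (hn : n ≤ segs.length) :
    (PySem.List.pyRange 0 (n : Int) 1).foldl
        (fun current_pos i => current_pos + (PySem.List.len (PySem.List.pyGetD segs i []) + 1)) 0
      = ((segs.take n).map (fun seg => (seg.length : Int))).sum + n := by
  induction n with
  | zero => simp [PySem.List.pyRange_one_eq_nil]
  | succ m ihm =>
      have hm : m ≤ segs.length := by omega
      have hmlt : m < segs.length := by omega
      have hcast : ((m + 1 : Nat) : Int) = (m : Int) + 1 := by push_cast; ring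
      rw [hcast, PySem.List.pyRange_one_succ_right (by positivity : (0:Int) ≤ (m:Int)),
        List.foldl_append, ihm hm]
      have hget : PySem.List.pyGetD segs (m : Int) [] = segs[m] := by
        rw [PySem.List.pyGetD_natCast]
        simp [List.getD, List.getElem?_eq_getElem hmlt]
      have htake : segs.take (m + 1) = segs.take m ++ [segs[m]] := by
        rw [List.take_add_one]
        simp [List.getElem?_eq_getElem hmlt]
      rw [htake]
      simp only [hget, PySem.List.len_eq, List.foldl_cons, List.foldl_nil, List.map_append,
        List.sum_append, List.map_cons, List.map_nil, List.sum_cons, List.sum_nil]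
      ring

-- ===== VERDICT (by name: the statement is the Claim_ definition above) =====
theorem get_segment_position_spec : Claim_equal_get_segment_position := by
  unfold Claim_equal_get_segment_position
  intro s si _dom
  unfold Spec_get_segment_position
  unfold get_segment_position get_segment_position_alt
  rw [splitOn_eq_pySplit]
  by_cases hneg : si < 0
  · rw [if_pos hneg, if_pos (by omega)]
  · rw [if_neg hneg]
    have hlen1 : 1 ≤ (pySplit s.toList).length := by
      cases hr : pySplit s.toList with
      | nil => exact absurd hr (pySplit_ne_nil s.toList)
      | cons a t => simp
    by_cases hzero : si = 0
    · subst hzero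
      rw [if_neg (by push_cast; omega), if_pos le_rfl]
      simp [PySem.List.pyRange_one_eq_nil]
    · have h1 : 1 ≤ si := by omega
      rw [if_neg (show ¬ si ≤ 0 by omega)]
      rw [gspScan_spec s.toList si h1 0]
      by_cases hge : si ≥ ((pySplit s.toList).length : Int)
      · rw [if_pos hge, if_pos (show ((pySplit s.toList).length : Int) ≤ si by omega)]
        simp
      · rw [if_neg hge, if_neg (show ¬ ((pySplit s.toList).length : Int) ≤ si by omega)]
        have hsn : ((si.toNat : Nat) : Int) = si := by omega
        have hle : si.toNat ≤ (pySplit s.toList).length := by omega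
        have hfold := foldA_spec (pySplit s.toList) si.toNat hle
        rw [hsn] at hfold
        rw [hfold]
        simp
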